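-- pv_equiv track=rewrite | github.com/MhrshadSh/Atlas | ci_stats.py | find_best_ci_index
-- ===== SOURCE A (Python) =====
-- from typing import List, Optional
--
-- def find_best_ci_index(ci_list: List[Optional[int]]) -> Optional[int]:
--     """Find the index of the minimum CI value in a list."""
--     best_val = None
--     best_idx = None
--     for i, v in enumerate(ci_list):
--         if v is None:
--             continue
--         if best_val is None or v < best_val:
--             best_val = v
--             best_idx = i
--     return best_idx
-- ===== SOURCE B (Python) =====
-- from typing import List, Optional
--
-- def find_best_ci_index(ci_list: List[Optional[int]]) -> Optional[int]:
--     """Find the index of the minimum CI value in a list."""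
--     idxs = [i for i, v in enumerate(ci_list) if v is not None]
--     order = sorted(idxs, key=lambda i: ci_list[i])
--     return order[0] if order else None
-- ===== Notes on version B (the rewrite author's own statement) =====
-- stated objective: alternative
-- what changed: Replaces the single-pass best_val/best_idx accumulator loop with a sort-based algorithm: collect the indices with non-None values, stably sort them by their CI value, and return the first index of the sorted order (stability plus increasing index order reproduces A's first-occurrence tie-breaking).
import Mathlib
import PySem

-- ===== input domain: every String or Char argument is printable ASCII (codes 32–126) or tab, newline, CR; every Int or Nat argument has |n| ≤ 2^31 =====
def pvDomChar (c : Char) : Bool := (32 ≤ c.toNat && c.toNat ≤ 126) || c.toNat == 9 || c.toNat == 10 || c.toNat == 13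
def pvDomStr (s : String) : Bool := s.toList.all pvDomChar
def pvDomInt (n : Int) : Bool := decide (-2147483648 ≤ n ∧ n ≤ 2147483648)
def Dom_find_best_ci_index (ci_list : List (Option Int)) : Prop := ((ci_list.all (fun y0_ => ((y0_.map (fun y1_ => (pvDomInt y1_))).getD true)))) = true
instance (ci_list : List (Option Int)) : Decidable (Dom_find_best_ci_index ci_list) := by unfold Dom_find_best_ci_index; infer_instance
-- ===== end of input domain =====

-- B replaces A's best_val/best_idx accumulator loop by a sort-based algorithm (stable sort of the
-- non-None indices by value, return the first); same return value, different algorithm.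

-- ===== PORT A =====
-- A's loop body: skip None, else update (best_val, best_idx) on strict improvement
def pvStepA (st : Option Int × Option Int) (p : Int × Option Int) : Option Int × Option Int :=
  match p.2 with
  | none => st
  | some v =>
    match st.1 with
    | none => (some v, some p.1)
    | some bv => if v < bv then (some v, some p.1) else st

def find_best_ci_index (ci_list : List (Option Int)) : Option Int :=
  ((PySem.List.enumerate ci_list 0).foldl pvStepA (none, none)).2

-- ===== PORT B =====
-- key=lambda i: ci_list[i]; every i in idxs has a non-None value, so the defaults are never used
def pvKey (ci_list : List (Option Int)) (i : Int) : Int :=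
  ((PySem.List.pyGet? ci_list i).join).getD 0

def find_best_ci_index_alt (ci_list : List (Option Int)) : Option Int :=
  let idxs := (PySem.List.enumerate ci_list 0).filterMap (fun p => p.2.map (fun _ => p.1))
  let order := PySem.List.sorted idxs (pvKey ci_list)
  match order with
  | [] => none
  | j :: _ => some j

-- ===== PRECONDITION & SPEC =====
def Spec_find_best_ci_index (ci_list : List (Option Int)) (out : Option Int) : Prop := out = find_best_ci_index_alt ci_list
instance (ci_list : List (Option Int)) (out : Option Int) : Decidable (Spec_find_best_ci_index ci_list out) := by unfold Spec_find_best_ci_index; infer_instance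

-- ===== CLAIM (what is proved, stated in full; the proofs are below) =====
def Claim_equal_find_best_ci_index : Prop := ∀ (ci_list : List (Option Int)), Dom_find_best_ci_index ci_list → Spec_find_best_ci_index ci_list (find_best_ci_index ci_list)

-- ===== LEMMAS AND PROOFS =====

-- the running "keep the first strict minimum" choice, as a two-argument step
def pvPick (key : Int → Int) (b x : Int) : Int := if key x < key b then x else b

def pvIdxs (l : List (Int × Option Int)) : List Int :=
  l.filterMap (fun p => p.2.map (fun _ => p.1))

-- A's fold, from a state that already holds a best (key b, b)
lemma pvFoldA_some (key : Int → Int) (l : List (Int × Option Int))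
    (hl : ∀ p ∈ l, ∀ v, p.2 = some v → key p.1 = v) (b : Int) :
    l.foldl pvStepA (some (key b), some b) =
      (some (key ((pvIdxs l).foldl (pvPick key) b)), some ((pvIdxs l).foldl (pvPick key) b)) := by
  induction l generalizing b with
  | nil => rfl
  | cons p l ih =>
    rcases p with ⟨i, v⟩
    have hl' : ∀ p ∈ l, ∀ v, p.2 = some v → key p.1 = v := fun p hp => hl p (List.mem_cons_of_mem _ hp)
    cases v with
    | none =>
      simpa [pvIdxs, List.filterMap_cons, pvStepA] using ih hl' b
    | some v =>
      have hk : key i = v := hl (i, some v) (List.mem_cons_self) v rfl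
      have hstep : pvStepA (some (key b), some b) (i, some v) =
          (some (key (pvPick key b i)), some (pvPick key b i)) := by
        simp only [pvStepA, pvPick, hk.symm]
        by_cases h : key i < key b <;> simp [h]
      simp only [List.foldl_cons, hstep, pvIdxs, List.filterMap_cons, Option.map_some]
      exact ih hl' (pvPick key b i)

-- A's fold from the empty state
lemma pvFoldA_none (key : Int → Int) (l : List (Int × Option Int))
    (hl : ∀ p ∈ l, ∀ v, p.2 = some v → key p.1 = v) :
    l.foldl pvStepA (none, none) =
      match pvIdxs l with
      | [] => (none, none)
      | j :: rest => (some (key (rest.foldl (pvPick key) j)), some (rest.foldl (pvPick key) j)) := by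
  induction l with
  | nil => rfl
  | cons p l ih =>
    rcases p with ⟨i, v⟩
    have hl' : ∀ p ∈ l, ∀ v, p.2 = some v → key p.1 = v := fun p hp => hl p (List.mem_cons_of_mem _ hp)
    cases v with
    | none =>
      simpa [pvIdxs, List.filterMap_cons, pvStepA] using ih hl'
    | some v =>
      have hk : key i = v := hl (i, some v) (List.mem_cons_self) v rfl
      have hstep : pvStepA (none, none) (i, some v) = (some (key i), some i) := by
        simp [pvStepA, hk]
      simp only [List.foldl_cons, hstep, pvIdxs, List.filterMap_cons, Option.map_some]
      exact pvFoldA_some key l hl' i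

-- inserting into a nonempty list: the head is x iff before x head
lemma pvInsertBy_cons (before : Int → Int → Bool) (x h : Int) (t : List Int) :
    PySem.List.insertBy before x (h :: t) =
      if before x h then x :: h :: t else h :: PySem.List.insertBy before x t := by
  simp [PySem.List.insertBy]

-- the head of a fold of insertBys over a nonempty accumulator is the running before-minimum
lemma pvHead_foldl_insertBy (before : Int → Int → Bool) (l : List Int) (h : Int) (t : List Int) :
    ∃ t', l.foldl (fun acc x => PySem.List.insertBy before x acc) (h :: t) =
      (l.foldl (fun b x => if before x b then x else b) h) :: t' := by
  induction l generalizing h t with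
  | nil => exact ⟨t, rfl⟩
  | cons x l ih =>
    simp only [List.foldl_cons, pvInsertBy_cons]
    by_cases hb : before x h
    · simpa [hb] using ih x (h :: t)
    · simpa [hb] using ih h (PySem.List.insertBy before x t)

-- the decide-form fold is pvPick's fold
lemma pvFold_decide (key : Int → Int) (l : List Int) (j : Int) :
    l.foldl (fun b x => if decide (key x < key b) = true then x else b) j =
      l.foldl (pvPick key) j := by
  induction l generalizing j with
  | nil => rfl
  | cons x l ih =>
    simp only [decide_eq_true_eq] at ih
    simp only [List.foldl_cons, pvPick, decide_eq_true_eq]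
    exact ih _

-- head of the stable sort = A's first-strict-minimum fold
lemma pvSorted_head (key : Int → Int) (j : Int) (rest : List Int) :
    ∃ t', PySem.List.sorted (j :: rest) key = (rest.foldl (pvPick key) j) :: t' := by
  rw [PySem.List.sorted_eq_foldl_insertBy]
  have h0 : PySem.List.insertBy (fun a b => decide (key a < key b)) j ([] : List Int) = [j] := rfl
  simp only [List.foldl_cons, h0]
  obtain ⟨t', ht⟩ := pvHead_foldl_insertBy (fun a b => decide (key a < key b)) rest j []
  refine ⟨t', ?_⟩
  rw [ht, pvFold_decide]

-- every pair produced by enumerate looks its value up correctly through pvKey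
lemma pvKey_enum (ci_list : List (Option Int)) :
    ∀ p ∈ PySem.List.enumerate ci_list 0, ∀ v, p.2 = some v → pvKey ci_list p.1 = v := by
  intro p hp v hv
  rw [PySem.List.mem_enumerate_iff] at hp
  obtain ⟨k, hk, rfl⟩ := hp
  simp only [zero_add] at hv ⊢
  simp [pvKey, PySem.List.pyGet?_natCast, List.getElem?_eq_getElem hk, hv]

-- ===== VERDICT (by name: the statement is the Claim_ definition above) =====
theorem find_best_ci_index_spec : Claim_equal_find_best_ci_index := by
  intro ci_list _
  unfold Spec_find_best_ci_index find_best_ci_index find_best_ci_index_alt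
  have hA := pvFoldA_none (pvKey ci_list) (PySem.List.enumerate ci_list 0) (pvKey_enum ci_list)
  rw [hA]
  show _ = (match PySem.List.sorted (pvIdxs (PySem.List.enumerate ci_list 0)) (pvKey ci_list) with
            | [] => none | j :: _ => some j)
  cases hi : pvIdxs (PySem.List.enumerate ci_list 0) with
  | nil => simp [PySem.List.sorted]
  | cons j rest =>
    obtain ⟨t', ht⟩ := pvSorted_head (pvKey ci_list) j rest
    simp [ht]
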